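-- pv_equiv track=rewrite | github.com/harlan3/hla-pathbuilder1_3 | scripts/convertlisp.py | lisp_to_xml
-- ===== SOURCE A (Python) =====
-- def lisp_to_xml(lisp_str):
--     def tokenize(s):
--         s = s.replace('(', ' ( ').replace(')', ' ) ').replace('"', ' " ')
--         tokens = []
--         current = ''
--         in_quotes = False
--         for char in s:
--             if char == '"':
--                 in_quotes = not in_quotes
--                 if not in_quotes and current:
--                     tokens.append(current)
--                     current = ''
--                 continue
--             if in_quotes:
--                 current += char
--             elif char.isspace():
--                 if current:
--                     tokens.append(current)
--                     current = ''
--             else: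
--                 current += char
--         if current:
--             tokens.append(current)
--         return tokens
--
--     def parse(tokens):
--         if not tokens:
--             return None
--         token = tokens.pop(0)
--         if token == '(':
--             lst = []
--             while tokens and tokens[0] != ')':
--                 lst.append(parse(tokens))
--             if tokens:
--                 tokens.pop(0)  # Remove ')'
--             return lst
--         return token
--
--     def to_xml(lst, indent=0):
--         if not lst:
--             return ''
--         if isinstance(lst, str):
--             return lst
--         tag = lst[0]
--         content = []
--         for item in lst[1:]:
--             if isinstance(item, list):
--                 content.append(to_xml(item, indent + 2))
--             else:
--                 content.append(item)
--         indent_str = ' ' * indent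
--         if content:
--             return (f'{indent_str}<{tag}>\n' +
--                     '\n'.join(c for c in content if c) +
--                     f'\n{indent_str}</{tag}>')
--         return f'{indent_str}<{tag}/>'
--
--     tokens = tokenize(lisp_str)
--     parsed = parse(tokens)
--     return to_xml(parsed)
-- ===== SOURCE B (Python) =====
-- def lisp_to_xml(lisp_str):
--     def tokenize(s):
--         s = s.replace('(', ' ( ').replace(')', ' ) ').replace('"', ' " ')
--         tokens = []
--         current = ''
--         in_quotes = False
--         for char in s:
--             if char == '"':
--                 in_quotes = not in_quotes
--                 if not in_quotes and current:
--                     tokens.append(current)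
--                     current = ''
--                 continue
--             if in_quotes:
--                 current += char
--             elif char.isspace():
--                 if current:
--                     tokens.append(current)
--                     current = ''
--             else:
--                 current += char
--         if current:
--             tokens.append(current)
--         return tokens
--
--     def parse(tokens):
--         # iterative: explicit stack of open lists instead of recursion / pop(0)
--         if not tokens:
--             return None
--         first = tokens[0]
--         if first != '(':
--             return first
--         root = []
--         stack = [root]
--         for tok in tokens[1:]:
--             if not stack:
--                 break
--             if tok == '(':
--                 child = []
--                 stack[-1].append(child)
--                 stack.append(child)
--             elif tok == ')':
--                 stack.pop()
--             else:
--                 stack[-1].append(tok)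
--         return root
--
--     def to_xml(lst, indent=0):
--         if not lst:
--             return ''
--         if isinstance(lst, str):
--             return lst
--         pieces = []
--         for item in lst[1:]:
--             s = to_xml(item, indent + 2) if isinstance(item, list) else item
--             if s:
--                 pieces.append(s)
--         pad = ' ' * indent
--         if len(lst) > 1:
--             return f'{pad}<{lst[0]}>\n' + '\n'.join(pieces) + f'\n{pad}</{lst[0]}>'
--         return f'{pad}<{lst[0]}/>'
--
--     tokens = tokenize(lisp_str)
--     parsed = parse(tokens)
--     return to_xml(parsed)
-- ===== Notes on version B (the rewrite author's own statement) =====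
-- stated objective: alternative
-- what changed: parse is rewritten from recursive descent over a destructively popped token list into a single left-to-right pass maintaining an explicit stack of open lists, and to_xml filters empty renderings while building instead of mapping all children and filtering at join time
import Mathlib
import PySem

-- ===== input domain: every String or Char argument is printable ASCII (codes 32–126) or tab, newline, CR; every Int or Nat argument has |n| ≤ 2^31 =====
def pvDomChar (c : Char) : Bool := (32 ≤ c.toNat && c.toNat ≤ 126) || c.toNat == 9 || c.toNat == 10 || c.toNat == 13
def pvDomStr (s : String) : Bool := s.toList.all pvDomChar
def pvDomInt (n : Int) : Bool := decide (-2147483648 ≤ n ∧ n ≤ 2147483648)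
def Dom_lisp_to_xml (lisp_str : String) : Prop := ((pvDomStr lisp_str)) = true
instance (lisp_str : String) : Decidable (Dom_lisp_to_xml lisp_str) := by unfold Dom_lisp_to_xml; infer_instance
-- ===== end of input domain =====

-- B replaces A's recursive-descent parse (over a destructively popped token list) by one linear
-- pass over the tokens with an explicit stack, and builds to_xml's child list already filtered.
-- Return values proved equal; neither implementation mutates its argument.


-- ===== SHARED VALUE TYPE =====
-- Python's parse result is a string or a (nested) list; mutual pair instead of a nested inductive.
mutual
inductive PTree where
  | atom : String → PTree
  | lst : PTList → PTree
inductive PTList where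
  | nil : PTList
  | cons : PTree → PTList → PTList
end

def PTList.append : PTList → PTList → PTList
  | .nil, ys => ys
  | .cons x xs, ys => .cons x (PTList.append xs ys)

def PTList.length : PTList → Nat
  | .nil => 0
  | .cons _ xs => PTList.length xs + 1

-- ===== SHARED FORMATTING HELPERS (identical Python text in A and B) =====
-- repr() of a Python str, exact for the chars admitted by Dom (printable ASCII, tab, LF, CR):
-- quote choice (double quotes iff the string has ' but no "), backslash and \t \n \r escaped.
def pyReprChars (cs : List Char) : List Char :=
  let q : Char := if cs.contains '\'' && !(cs.contains '"') then '"' else '\''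
  let body := cs.flatMap (fun c =>
    if c = '\\' then ['\\', '\\']
    else if c = '\t' then ['\\', 't']
    else if c = '\n' then ['\\', 'n']
    else if c = '\r' then ['\\', 'r']
    else if c = q then ['\\', q]
    else [c])
  q :: body ++ [q]

-- str()/f-string of a parsed value: a str prints itself, a list prints as Python's list repr.
mutual
def treeRepr : PTree → String
  | .atom s => String.ofList (pyReprChars s.toList)
  | .lst l => "[" ++ innerRepr l ++ "]"
def innerRepr : PTList → String
  | .nil => ""
  | .cons t .nil => treeRepr t
  | .cons t (.cons u rest) => treeRepr t ++ ", " ++ innerRepr (.cons u rest)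
end

def treeFmt : PTree → String
  | .atom s => s
  | .lst l => "[" ++ innerRepr l ++ "]"

-- tokenize: identical in both Pythons (the hinted re-implementation keeps it); ported once.
def tokenizeAux : List Char → List String → List Char → Bool → List String
  | [], toks, cur, _ => if cur ≠ [] then toks ++ [String.ofList cur] else toks
  | c :: cs, toks, cur, q =>
    if c = '"' then
      -- in_quotes = not in_quotes; if not in_quotes and current: flush
      if q && cur ≠ [] then tokenizeAux cs (toks ++ [String.ofList cur]) [] false
      else tokenizeAux cs toks cur (!q)
    else if q then tokenizeAux cs toks (cur ++ [c]) q
    else if PySem.Chars.isspace c then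
      if cur ≠ [] then tokenizeAux cs (toks ++ [String.ofList cur]) [] q
      else tokenizeAux cs toks cur q
    else tokenizeAux cs toks (cur ++ [c]) q

def tokenize (s : String) : List String :=
  tokenizeAux (PySem.Str.replace (PySem.Str.replace (PySem.Str.replace s "(" " ( ") ")" " ) ") "\"" " \" ").toList [] [] false

-- ===== PORT A =====
-- A's recursive parse: the children loop 'while tokens and tokens[0] != ")": lst.append(parse(tokens))'
-- with parse's two cases inlined (inside the loop tokens is nonempty, so parse never returns None);
-- the destructive pop-from-the-front becomes returning the remaining token list; fuel only for totality
-- ('.drop 1' is the trailing 'if tokens: tokens.pop(0)' removing the ")").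
def parseManyA : Nat → List String → PTList × List String
  | 0, toks => (.nil, toks)
  | fuel + 1, toks =>
    match toks with
    | [] => (.nil, [])
    | t :: rest =>
      if t = ")" then (.nil, t :: rest)
      else if t = "(" then
        let p := parseManyA fuel rest
        let q := parseManyA fuel (p.2.drop 1)
        (.cons (.lst p.1) q.1, q.2)
      else
        let q := parseManyA fuel rest
        (.cons (.atom t) q.1, q.2)

-- A's to_xml: content collects a rendering for EVERY child (possibly ''), the join filters falsy ones.
mutual
def toXmlA : PTree → Nat → String
  | .atom s, _ => s                       -- 'if not lst: return ""' and 'return lst' both yield s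
  | .lst .nil, _ => ""                    -- empty list is falsy
  | .lst (.cons tag rest), indent =>
    let content := contentA rest indent
    let indentStr := String.ofList (List.replicate indent ' ')
    if content ≠ [] then
      indentStr ++ "<" ++ treeFmt tag ++ ">\n"
        ++ PySem.Str.join "\n" (content.filter (fun c => c ≠ ""))
        ++ "\n" ++ indentStr ++ "</" ++ treeFmt tag ++ ">"
    else indentStr ++ "<" ++ treeFmt tag ++ "/>"
def contentA : PTList → Nat → List String
  | .nil, _ => []
  | .cons item rest, indent =>
    (match item with
     | .lst l => toXmlA (.lst l) (indent + 2)
     | .atom s => s) :: contentA rest indent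
end

-- A's parse, top level: pop the first token; '(' starts the children loop, anything else is returned.
def parseA (tokens : List String) : Option PTree :=
  match tokens with
  | [] => none                                           -- parse([]) = None
  | t :: rest =>
    if t = "(" then some (.lst (parseManyA (rest.length + 1) rest).1)
    else some (.atom t)

def lisp_to_xml (lisp_str : String) : String :=
  match parseA (tokenize lisp_str) with
  | none => ""                                           -- to_xml(None): None is falsy
  | some t => toXmlA t 0

-- ===== PORT B =====
-- B's iterative parse: one pass, explicit stack of open child lists (head = innermost); Lean being
-- immutable, a closed list is appended to its parent when popped rather than aliased when pushed —
-- the resulting tree is the same; popping the last frame (Python's 'if not stack: break') returns the root.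
def closeAllB : PTList → List PTList → PTList
  | top, [] => top
  | top, p :: bs => closeAllB (p.append (.cons (.lst top) .nil)) bs

def loopB : List String → PTList → List PTList → PTList
  | [], top, below => closeAllB top below
  | tok :: ts, top, below =>
    if tok = "(" then loopB ts .nil (top :: below)
    else if tok = ")" then
      match below with
      | [] => top
      | p :: bs => loopB ts (p.append (.cons (.lst top) .nil)) bs
    else loopB ts (top.append (.cons (.atom tok) .nil)) below

-- B's to_xml: pieces keeps only the non-empty renderings; the tag/branch test is len(lst) > 1.
mutual
def toXmlB : PTree → Nat → String
  | .atom s, _ => s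
  | .lst .nil, _ => ""
  | .lst (.cons tag rest), indent =>
    let pieces := piecesB rest indent
    let pad := String.ofList (List.replicate indent ' ')
    if 1 < PTList.length (.cons tag rest) then
      pad ++ "<" ++ treeFmt tag ++ ">\n" ++ PySem.Str.join "\n" pieces
        ++ "\n" ++ pad ++ "</" ++ treeFmt tag ++ ">"
    else pad ++ "<" ++ treeFmt tag ++ "/>"
def piecesB : PTList → Nat → List String
  | .nil, _ => []
  | .cons item rest, indent =>
    let s := match item with
      | .lst l => toXmlB (.lst l) (indent + 2)
      | .atom a => a
    if s ≠ "" then s :: piecesB rest indent else piecesB rest indent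
end

def parseB (tokens : List String) : Option PTree :=
  match tokens with
  | [] => none
  | first :: rest =>
    if first ≠ "(" then some (.atom first)
    else some (.lst (loopB rest .nil []))

def lisp_to_xml_alt (lisp_str : String) : String :=
  match parseB (tokenize lisp_str) with
  | none => ""
  | some t => toXmlB t 0

-- ===== PRECONDITION & SPEC =====
def Spec_lisp_to_xml (lisp_str : String) (out : String) : Prop := out = lisp_to_xml_alt lisp_str
instance (lisp_str : String) (out : String) : Decidable (Spec_lisp_to_xml lisp_str out) := by unfold Spec_lisp_to_xml; infer_instance

-- ===== CLAIM (what is proved, stated in full; the proofs are below) =====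
def Claim_equal_lisp_to_xml : Prop := ∀ (lisp_str : String), Dom_lisp_to_xml lisp_str → Spec_lisp_to_xml lisp_str (lisp_to_xml lisp_str)

-- ===== LEMMAS AND PROOFS =====

theorem PTList.append_nil : ∀ (l : PTList), l.append .nil = l
  | .nil => rfl
  | .cons x xs => by rw [PTList.append, PTList.append_nil xs]

theorem PTList.append_assoc : ∀ (a : PTList) (b c : PTList),
    (a.append b).append c = a.append (b.append c)
  | .nil, _, _ => rfl
  | .cons x xs, b, c => by rw [PTList.append, PTList.append, PTList.append,
      PTList.append_assoc xs b c]

theorem PTList.nil_append (l : PTList) : PTList.append .nil l = l := rfl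

theorem pm_nil (fuel : Nat) : parseManyA fuel [] = (.nil, []) := by
  cases fuel <;> rfl

-- one-step unfoldings of parseManyA with successor fuel
theorem pm_unfold_close (f : Nat) (ts : List String) :
    parseManyA (f + 1) (")" :: ts) = (.nil, ")" :: ts) := by
  simp [parseManyA]

theorem pm_unfold_paren (f : Nat) (ts : List String) :
    parseManyA (f + 1) ("(" :: ts)
      = (.cons (.lst (parseManyA f ts).1)
               (parseManyA f ((parseManyA f ts).2.drop 1)).1,
         (parseManyA f ((parseManyA f ts).2.drop 1)).2) := by
  simp [parseManyA]

theorem pm_unfold_atom (f : Nat) (t : String) (ts : List String)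
    (h1 : ¬ t = ")") (h2 : ¬ t = "(") :
    parseManyA (f + 1) (t :: ts)
      = (.cons (.atom t) (parseManyA f ts).1, (parseManyA f ts).2) := by
  simp [parseManyA, h1, h2]

-- parseManyA with enough fuel: fuel-irrelevant, consumes no more than it is given,
-- and stops only at the end of the tokens or in front of a ")".
theorem pmA_facts : ∀ (n : Nat) (toks : List String), toks.length ≤ n →
    (∀ fuel, toks.length ≤ fuel → parseManyA fuel toks = parseManyA toks.length toks) ∧
    (parseManyA toks.length toks).2.length ≤ toks.length ∧
    ((parseManyA toks.length toks).2 = [] ∨ ∃ r', (parseManyA toks.length toks).2 = ")" :: r') := by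
  intro n
  induction n with
  | zero =>
    intro toks h
    have htoks : toks = [] := List.eq_nil_of_length_eq_zero (Nat.le_zero.mp h)
    subst htoks
    exact ⟨fun fuel _ => by rw [pm_nil, pm_nil], by simp [pm_nil], Or.inl (by simp [pm_nil])⟩
  | succ m ih =>
    intro toks h
    cases toks with
    | nil =>
      exact ⟨fun fuel _ => by rw [pm_nil, pm_nil], by simp [pm_nil], Or.inl (by simp [pm_nil])⟩
    | cons t ts =>
      have hts : ts.length ≤ m := by simpa using h
      by_cases h1 : t = ")"
      · subst h1
        refine ⟨?_, ?_, ?_⟩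
        · intro fuel hf
          cases fuel with
          | zero => simp at hf
          | succ f => rw [List.length_cons, pm_unfold_close, pm_unfold_close]
        · rw [List.length_cons, pm_unfold_close]; simp
        · rw [List.length_cons, pm_unfold_close]; exact Or.inr ⟨ts, rfl⟩
      · obtain ⟨irr, hlen, hstop⟩ := ih ts hts
        by_cases h2 : t = "("
        · subst h2
          have hdlen : ((parseManyA ts.length ts).2.drop 1).length ≤ ts.length := by
            rw [List.length_drop]; omega
          obtain ⟨irr2, hlen2, hstop2⟩ :=
            ih ((parseManyA ts.length ts).2.drop 1) (le_trans hdlen hts)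
          refine ⟨?_, ?_, ?_⟩
          · intro fuel hf
            cases fuel with
            | zero => simp at hf
            | succ f =>
              have hf' : ts.length ≤ f := by simpa using hf
              rw [List.length_cons, pm_unfold_paren, pm_unfold_paren, irr f hf',
                  irr2 f (le_trans hdlen hf'), irr2 ts.length hdlen]
          · rw [List.length_cons, pm_unfold_paren, irr2 ts.length hdlen]
            exact le_trans (le_trans hlen2 hdlen) (by simp)
          · rw [List.length_cons, pm_unfold_paren, irr2 ts.length hdlen]
            exact hstop2
        · refine ⟨?_, ?_, ?_⟩
          · intro fuel hf
            cases fuel with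
            | zero => simp at hf
            | succ f =>
              have hf' : ts.length ≤ f := by simpa using hf
              rw [List.length_cons, pm_unfold_atom f t ts h1 h2,
                  pm_unfold_atom ts.length t ts h1 h2, irr f hf']
          · rw [List.length_cons, pm_unfold_atom ts.length t ts h1 h2]
            exact le_trans hlen (by simp)
          · rw [List.length_cons, pm_unfold_atom ts.length t ts h1 h2]
            exact hstop

-- what B's loop does to the tokens A's children-parser has not consumed
def contB : PTList × List String → PTList → List PTList → PTList
  | (xs, r), top, below =>
    match r, below with
    | [], _ => closeAllB (top.append xs) below
    | _ :: _, [] => top.append xs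
    | _ :: r', p :: bs => loopB r' (p.append (.cons (.lst (top.append xs)) .nil)) bs

theorem contB_shift (u : PTree) (xs : PTList) (r' : List String)
    (top : PTList) (below : List PTList) :
    contB (xs, r') (top.append (.cons u .nil)) below = contB (.cons u xs, r') top below := by
  have hx : (top.append (.cons u .nil)).append xs = top.append (.cons u xs) := by
    rw [PTList.append_assoc]; rfl
  cases r' with
  | nil => simp [contB, hx]
  | cons c r'' => cases below <;> simp [contB, hx]

theorem simB : ∀ (n : Nat) (toks : List String), toks.length ≤ n → ∀ top below,
    loopB toks top below = contB (parseManyA toks.length toks) top below := by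
  intro n
  induction n with
  | zero =>
    intro toks h top below
    have htoks : toks = [] := List.eq_nil_of_length_eq_zero (Nat.le_zero.mp h)
    subst htoks
    simp [loopB, pm_nil, contB, PTList.append_nil]
  | succ m ih =>
    intro toks h top below
    cases toks with
    | nil => simp [loopB, pm_nil, contB, PTList.append_nil]
    | cons t ts =>
      have hts : ts.length ≤ m := by simpa using h
      obtain ⟨irr, hlen, hstop⟩ := pmA_facts ts.length ts le_rfl
      by_cases h1 : t = ")"
      · subst h1
        have hA : parseManyA (")" :: ts).length (")" :: ts) = (.nil, ")" :: ts) := by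
          show parseManyA (ts.length + 1) _ = _
          simp [parseManyA]
        rw [hA]
        cases below <;> simp [loopB, contB, PTList.append_nil]
      · rcases hpm : parseManyA ts.length ts with ⟨l, r⟩
        rw [hpm] at hlen hstop
        by_cases h2 : t = "("
        · subst h2
          have hL : loopB ("(" :: ts) top below = loopB ts .nil (top :: below) := by
            simp [loopB]
          rw [hL, ih ts hts, hpm]
          rcases hstop with hr | ⟨r2, hr⟩
          · -- children parser consumed everything
            subst hr
            have hA : parseManyA ("(" :: ts).length ("(" :: ts) = (.cons (.lst l) .nil, []) := by
              show parseManyA (ts.length + 1) _ = _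
              simp only [parseManyA, ite_true]
              rw [hpm]
              simp [pm_nil]
            rw [hA]
            simp [contB, closeAllB, PTList.nil_append]
          · -- children parser stopped at ")" with r2 left over
            subst hr
            have hr2 : r2.length ≤ m := by
              simp at hlen; omega
            rcases hq : parseManyA r2.length r2 with ⟨xs, r'⟩
            have hA : parseManyA ("(" :: ts).length ("(" :: ts) = (.cons (.lst l) xs, r') := by
              show parseManyA (ts.length + 1) _ = _
              simp only [parseManyA, ite_true]
              rw [hpm]
              simp only [List.drop_succ_cons, List.drop_zero]
              rw [(pmA_facts r2.length r2 le_rfl).1 ts.length (by simp at hlen; omega), hq]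
              simp
            rw [hA]
            have hC : contB (l, ")" :: r2) .nil (top :: below)
                = loopB r2 (top.append (.cons (.lst l) .nil)) below := by
              simp [contB, PTList.nil_append]
            rw [hC, ih r2 hr2, hq, contB_shift]
        · -- plain atom token
          have hL : loopB (t :: ts) top below
              = loopB ts (top.append (.cons (.atom t) .nil)) below := by
            simp [loopB, h1, h2]
          have hA : parseManyA (t :: ts).length (t :: ts) = (.cons (.atom t) l, r) := by
            show parseManyA (ts.length + 1) _ = _
            simp only [parseManyA, h1, h2, ite_false]
            rw [hpm]
          rw [hL, ih ts hts, hpm, hA, contB_shift]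

theorem parseTop_eq (rest : List String) :
    loopB rest .nil [] = (parseManyA (rest.length + 1) rest).1 := by
  rw [(pmA_facts rest.length rest le_rfl).1 (rest.length + 1) (by omega)]
  rw [simB rest.length rest le_rfl .nil []]
  rcases hpm : parseManyA rest.length rest with ⟨xs, r⟩
  cases r <;> simp [contB, closeAllB, PTList.nil_append]

theorem parse_eq (tk : List String) : parseA tk = parseB tk := by
  cases tk with
  | nil => rfl
  | cons t rest =>
    by_cases ht : t = "("
    · simp [parseA, parseB, ht, parseTop_eq]
    · simp [parseA, parseB, ht]

theorem contentA_nil (ind : Nat) : contentA .nil ind = [] := by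
  rw [contentA.eq_def]

theorem contentA_cons (item : PTree) (rest : PTList) (ind : Nat) :
    contentA (.cons item rest) ind
      = (match item with
         | .lst l => toXmlA (.lst l) (ind + 2)
         | .atom s => s) :: contentA rest ind := by
  rw [contentA.eq_def]

theorem piecesB_cons (item : PTree) (rest : PTList) (ind : Nat) :
    piecesB (.cons item rest) ind
      = (let s := match item with
           | .lst l => toXmlB (.lst l) (ind + 2)
           | .atom a => a
         if s ≠ "" then s :: piecesB rest ind else piecesB rest ind) := by
  rw [piecesB.eq_def]

mutual
theorem toXml_eq : ∀ (t : PTree) (ind : Nat), toXmlA t ind = toXmlB t ind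
  | .atom _, _ => rfl
  | .lst .nil, _ => rfl
  | .lst (.cons tag rest), ind => by
    rw [toXmlA, toXmlB]
    cases rest with
    | nil => simp [contentA_nil, PTList.length]
    | cons u v =>
      have hc : contentA (.cons u v) ind ≠ [] := by
        rw [contentA.eq_def]; exact List.cons_ne_nil _ _
      have hl : 1 < PTList.length (.cons tag (.cons u v)) := by
        simp [PTList.length]
      rw [if_pos hc, if_pos hl, pieces_eq (.cons u v) ind]
theorem pieces_eq : ∀ (l : PTList) (ind : Nat),
    (contentA l ind).filter (fun c => c ≠ "") = piecesB l ind
  | .nil, _ => rfl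
  | .cons item rest, ind => by
    rw [contentA_cons, piecesB_cons]
    have h : (match item with
        | .lst l => toXmlA (.lst l) (ind + 2)
        | .atom s => s)
        = (match item with
        | .lst l => toXmlB (.lst l) (ind + 2)
        | .atom a => a) := by
      cases item with
      | atom s => rfl
      | lst l => exact toXml_eq (.lst l) (ind + 2)
    rw [List.filter_cons, h, pieces_eq rest ind]
    simp
end

-- ===== VERDICT (by name: the statement is the Claim_ definition above) =====
theorem lisp_to_xml_spec : Claim_equal_lisp_to_xml := by
  intro s _
  unfold Spec_lisp_to_xml
  show lisp_to_xml s = lisp_to_xml_alt s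
  rw [lisp_to_xml, lisp_to_xml_alt, ← parse_eq]
  cases parseA (tokenize s) with
  | none => rfl
  | some t => exact toXml_eq t 0
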